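-- pv_equiv track=rewrite | github.com/jiahaoxu14/FeatureWind | featurewind/visualization/legend_manager.py | _create_family_name
-- ===== SOURCE A (Python) =====
-- def _create_family_name(feature_names, family_id, max_length=12):
--     """
--     Create a descriptive name for a family based on feature names.
--
--     Args:
--         feature_names: list of feature names in this family
--         family_id: numeric family ID
--         max_length: maximum length for the name
--
--     Returns:
--         str: descriptive family name
--     """
--     if not feature_names:
--         return f"Family {family_id + 1}"
--
--     if len(feature_names) == 1:
--         name = feature_names[0]
--         return name[:max_length] + "..." if len(name) > max_length else name
--
--     # Look for common prefixes or words
--     words_sets = [set(name.lower().replace('_', ' ').split()) for name in feature_names]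
--
--     if len(words_sets) > 1:
--         common_words = set.intersection(*words_sets)
--
--         if common_words:
--             # Use most meaningful common word
--             meaningful_words = [w for w in common_words
--                               if len(w) > 2 and w not in ['the', 'and', 'for', 'with']]
--             if meaningful_words:
--                 name = max(meaningful_words, key=len).title()
--                 return (name[:max_length-2] + "..") if len(name) > max_length else name
--
--     # Look for common prefixes
--     if len(feature_names) > 1:
--         # Find longest common prefix
--         sorted_names = sorted(feature_names)
--         prefix = ""
--         for i, char in enumerate(sorted_names[0]):
--             if i < len(sorted_names[-1]) and char == sorted_names[-1][i]:
--                 prefix += char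
--             else:
--                 break
--
--         # Clean up prefix (remove trailing underscores/spaces)
--         prefix = prefix.rstrip('_ ').strip()
--
--         if len(prefix) >= 3:
--             name = prefix.title()
--             return (name[:max_length-2] + "..") if len(name) > max_length else name
--
--     # Fallback: generic family name
--     return f"Family {family_id + 1}"
-- ===== SOURCE B (Python) =====
-- def _create_family_name(feature_names, family_id, max_length=12):
--     if not feature_names:
--         return f"Family {family_id + 1}"
--     if len(feature_names) == 1:
--         name = feature_names[0]
--         return name[:max_length] + "..." if len(name) > max_length else name
--
--     first, rest = feature_names[0], feature_names[1:]
--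
--     def words(n):
--         return n.lower().replace('_', ' ').split()
--
--     # Common meaningful words: scan the first name's words once, keeping those
--     # present in every other name (no list of sets, no set.intersection).
--     rest_word_sets = [set(words(n)) for n in rest]
--     candidates = [w for w in words(first)
--                   if len(w) > 2 and w not in ('the', 'and', 'for', 'with')
--                   and all(w in ws for ws in rest_word_sets)]
--     if candidates:
--         name = max(candidates, key=len).title()
--         return (name[:max_length - 2] + "..") if len(name) > max_length else name
--
--     # Longest common prefix by a direct column scan over all names (no sort).
--     prefix_chars = []
--     for i, ch in enumerate(first):
--         if all(i < len(n) and n[i] == ch for n in rest):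
--             prefix_chars.append(ch)
--         else:
--             break
--     prefix = ''.join(prefix_chars).rstrip('_ ').strip()
--
--     if len(prefix) >= 3:
--         name = prefix.title()
--         return (name[:max_length - 2] + "..") if len(name) > max_length else name
--
--     return f"Family {family_id + 1}"
-- ===== Notes on version B (the rewrite author's own statement) =====
-- stated objective: alternative
-- what changed: Common meaningful words are found by one filtered pass over the first name's words (checking membership in the other names) instead of building per-name word sets and folding set.intersection, and the longest common prefix is computed by a direct column scan over all names instead of sorting the list and comparing sorted[0] with sorted[-1].
-- outside the precondition, e.g. on _create_family_name(['abc abd', 'abd abc'], 0, 2): A returns '..', B returns '..'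
import Mathlib
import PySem

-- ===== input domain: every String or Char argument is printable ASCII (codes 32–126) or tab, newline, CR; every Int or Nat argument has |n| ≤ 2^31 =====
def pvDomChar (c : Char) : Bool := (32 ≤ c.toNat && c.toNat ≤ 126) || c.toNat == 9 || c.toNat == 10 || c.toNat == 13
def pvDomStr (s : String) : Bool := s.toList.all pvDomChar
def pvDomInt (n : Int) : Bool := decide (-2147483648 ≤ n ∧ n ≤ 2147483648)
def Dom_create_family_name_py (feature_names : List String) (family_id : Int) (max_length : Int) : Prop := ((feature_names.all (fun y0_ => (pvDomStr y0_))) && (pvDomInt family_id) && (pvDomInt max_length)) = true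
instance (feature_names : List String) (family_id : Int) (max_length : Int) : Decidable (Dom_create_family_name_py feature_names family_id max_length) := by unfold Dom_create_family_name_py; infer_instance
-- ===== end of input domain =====

-- B replaces the per-name word-set intersection by one filtered pass over the first
-- name's words and the sort-then-compare longest-common-prefix by a column scan; alternative, not claimed faster.

-- ===== PORT A =====
-- shared primitive ports (both Pythons call these exact library operations):
-- str.title(), hand-ported (PySem has no title); exact on the ASCII domain:
-- a letter after a non-letter is uppercased, a letter after a letter lowercased, others kept.
def pvTitleGo (prevAlpha : Bool) : List Char → List Char
  | [] => []
  | c :: t =>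
    (if PySem.Chars.isalpha c then
       (if prevAlpha then PySem.Chars.lowerChar c else PySem.Chars.upperChar c)
     else c) :: pvTitleGo (PySem.Chars.isalpha c) t

def pvTitle (s : String) : String := String.ofList (pvTitleGo false s.toList)

-- s.rstrip('_ '), hand-ported (PySem.Str.rstrip strips only whitespace); exact.
def pvRstripUS (s : String) : String :=
  String.ofList ((s.toList.reverse.dropWhile (fun c => c = '_' || c = ' ')).reverse)

-- prefix.rstrip('_ ').strip()
def pvClean (s : String) : String := PySem.Str.strip (pvRstripUS s)

-- name.lower().replace('_', ' ').split()
def pvWords (s : String) : List String :=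
  PySem.Str.split₀ (PySem.Str.replace (PySem.Str.lower s) "_" " ")

-- len(w) > 2 and w not in ['the', 'and', 'for', 'with']
def pvMeaningfulPred (w : String) : Bool :=
  decide (2 < PySem.Str.len w) && !(["the", "and", "for", "with"].contains w)

-- (name[:max_length-2] + "..") if len(name) > max_length else name
def pvTrunc (name : String) (maxLength : Int) : String :=
  if maxLength < PySem.Str.len name then PySem.Str.slice name none (some (maxLength - 2)) ++ ".." else name

-- A's prefix loop: for i, char in enumerate(s0): if i < len(sl) and char == sl[i]: prefix += char; else break
def pvLcp2 : List Char → List Char → List Char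
  | [], _ => []
  | _ :: _, [] => []
  | c :: t, d :: u => if c = d then c :: pvLcp2 t u else []

def create_family_name_py (feature_names : List String) (family_id : Int) (max_length : Int) : String :=
  if feature_names = [] then "Family " ++ PySem.Int.toStr (family_id + 1)
  else if feature_names.length = 1 then
    let name := PySem.List.pyGetD feature_names 0 ""
    if max_length < PySem.Str.len name then PySem.Str.slice name none (some max_length) ++ "..." else name
  else
    let wordsSets : List (PySem.Set String) := feature_names.map (fun n => PySem.Set.ofList (pvWords n))
    -- the two nested ifs of the common-word paragraph, as an early-return option
    let early : Option String :=
      if 1 < wordsSets.length then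
        let commonWords : PySem.Set String :=
          match wordsSets with
          | [] => PySem.Set.empty
          | s0 :: restSets => restSets.foldl PySem.Set.inter s0
        if commonWords ≠ [] then
          let meaningfulWords := commonWords.filter pvMeaningfulPred
          if meaningfulWords ≠ [] then
            some (pvTrunc (pvTitle ((PySem.List.max? meaningfulWords (fun w => PySem.Str.len w)).getD "")) max_length)
          else none
        else none
      else none
    early.getD
      (if 1 < feature_names.length then
        let sortedNames := PySem.List.sorted feature_names (fun x => x) false
        let s0 := PySem.List.pyGetD sortedNames 0 ""
        let sl := PySem.List.pyGetD sortedNames (-1) ""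
        let pfx := pvClean (String.ofList (pvLcp2 s0.toList sl.toList))
        if 3 ≤ PySem.Str.len pfx then pvTrunc (pvTitle pfx) max_length
        else "Family " ++ PySem.Int.toStr (family_id + 1)
      else "Family " ++ PySem.Int.toStr (family_id + 1))

-- ===== PORT B =====
-- the column scan: keep a character of the first name iff every other name has it at the same index
def pvColScan : List Char → List (List Char) → List Char
  | [], _ => []
  | c :: t, others =>
    if others.all (fun o => o.head? == some c) then c :: pvColScan t (others.map List.tail)
    else []

def create_family_name_py_alt (feature_names : List String) (family_id : Int) (max_length : Int) : String :=
  match feature_names with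
  | [] => "Family " ++ PySem.Int.toStr (family_id + 1)
  | [name] =>
    if max_length < PySem.Str.len name then PySem.Str.slice name none (some max_length) ++ "..." else name
  | first :: rest =>
    let restWordSets : List (PySem.Set String) := rest.map (fun n => PySem.Set.ofList (pvWords n))
    let candidates := (pvWords first).filter
      (fun w => pvMeaningfulPred w && restWordSets.all (fun ws => PySem.Set.contains ws w))
    if candidates ≠ [] then
      pvTrunc (pvTitle ((PySem.List.max? candidates (fun w => PySem.Str.len w)).getD "")) max_length
    else
      let pfx := pvClean (String.ofList (pvColScan first.toList (rest.map String.toList)))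
      if 3 ≤ PySem.Str.len pfx then pvTrunc (pvTitle pfx) max_length
      else "Family " ++ PySem.Int.toStr (family_id + 1)

-- ===== PRECONDITION & SPEC =====
-- the distinct meaningful common words of the names (lower-cased, '_'→' ', split)
def pvDistinctMeaningful (feature_names : List String) : List String :=
  match feature_names with
  | [] => []
  | first :: rest =>
    PySem.Set.ofList ((pvWords first).filter
      (fun w => pvMeaningfulPred w && rest.all (fun n => (pvWords n).contains w)))

-- Pre_ excludes inputs on which two distinct meaningful common words share the maximal
-- length: there A's max over a hash-ordered Python set iterates nondeterministically
-- (the result depends on PYTHONHASHSEED), so no deterministic value can be claimed.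
def Pre_create_family_name_py (feature_names : List String) (family_id : Int) (max_length : Int) : Prop :=
  ((pvDistinctMeaningful feature_names).filter
    (fun w => decide (∀ v ∈ pvDistinctMeaningful feature_names, PySem.Str.len v ≤ PySem.Str.len w))).length ≤ 1

instance (feature_names : List String) (family_id : Int) (max_length : Int) : Decidable (Pre_create_family_name_py feature_names family_id max_length) := by unfold Pre_create_family_name_py; infer_instance

def pvWitness_create_family_name_py : List String × Int × Int := ([], 0, 12)

def Spec_create_family_name_py (feature_names : List String) (family_id : Int) (max_length : Int) (out : String) : Prop := out = create_family_name_py_alt feature_names family_id max_length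
instance (feature_names : List String) (family_id : Int) (max_length : Int) (out : String) : Decidable (Spec_create_family_name_py feature_names family_id max_length out) := by unfold Spec_create_family_name_py; infer_instance

-- ===== CLAIM (what is proved, stated in full; the proofs are below) =====
def Claim_equal_create_family_name_py : Prop := ∀ (feature_names : List String) (family_id : Int) (max_length : Int), Dom_create_family_name_py feature_names family_id max_length → Pre_create_family_name_py feature_names family_id max_length → Spec_create_family_name_py feature_names family_id max_length (create_family_name_py feature_names family_id max_length)

-- ===== LEMMAS AND PROOFS =====

-- a list of length ≤ 1 has at most one member
lemma pvLenLeOne {α : Type} {l : List α} (h : l.length ≤ 1) {x y : α} (hx : x ∈ l) (hy : y ∈ l) : x = y := by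
  match l with
  | [] => cases hx
  | [a] => simp at hx hy; simp [hx, hy]
  | a :: b :: t => simp at h

lemma pvMemFoldlInter (s : PySem.Set String) (l : List (PySem.Set String)) (x : String) :
    x ∈ l.foldl PySem.Set.inter s ↔ x ∈ s ∧ ∀ t ∈ l, x ∈ t := by
  induction l generalizing s with
  | nil => simp
  | cons t l ih => simp [List.foldl_cons, ih, PySem.Set.mem_inter]; tauto

-- the three lists that enumerate "meaningful common words" have the same members
-- (stated for a generic word function W and predicate p to keep the strings symbolic)
lemma pvMemMeaningful (W : String → List String) (p : String → Bool)
    (first : String) (rest : List String) (w : String) :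
    w ∈ (((rest.map (fun n => PySem.Set.ofList (W n))).foldl PySem.Set.inter
          (PySem.Set.ofList (W first))).filter p)
      ↔ (p w = true ∧ w ∈ W first ∧ ∀ n ∈ rest, w ∈ W n) := by
  rw [List.mem_filter, pvMemFoldlInter]
  simp only [PySem.Set.mem_ofList, List.mem_map]
  constructor
  · rintro ⟨⟨h1, h2⟩, h3⟩
    exact ⟨h3, h1, fun n hn => (PySem.Set.mem_ofList _ _).mp (h2 _ ⟨n, hn, rfl⟩)⟩
  · rintro ⟨h3, h1, h2⟩
    exact ⟨⟨h1, by rintro t ⟨n, hn, rfl⟩; exact (PySem.Set.mem_ofList _ _).mpr (h2 n hn)⟩, h3⟩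

lemma pvMemCandidates (W : String → List String) (p : String → Bool)
    (first : String) (rest : List String) (w : String) :
    w ∈ (W first).filter
        (fun w => p w && (rest.map (fun n => PySem.Set.ofList (W n))).all
          (fun ws => PySem.Set.contains ws w))
      ↔ (p w = true ∧ w ∈ W first ∧ ∀ n ∈ rest, w ∈ W n) := by
  rw [List.mem_filter]
  simp only [Bool.and_eq_true, List.all_eq_true, List.mem_map, PySem.Set.contains,
    List.contains_iff_mem, forall_exists_index, and_imp]
  constructor
  · rintro ⟨h1, h2, h3⟩
    refine ⟨h2, h1, fun n hn => ?_⟩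
    have := h3 (PySem.Set.ofList (W n)) n hn rfl
    exact (PySem.Set.mem_ofList _ _).mp (by simpa using this)
  · rintro ⟨h2, h1, h3⟩
    refine ⟨h1, h2, ?_⟩
    rintro t n hn rfl
    simpa using (PySem.Set.mem_ofList (W n) w).mpr (h3 n hn)

lemma pvMemDistinct (W : String → List String) (p : String → Bool)
    (first : String) (rest : List String) (w : String) :
    w ∈ PySem.Set.ofList ((W first).filter
        (fun w => p w && rest.all (fun n => (W n).contains w)))
      ↔ (p w = true ∧ w ∈ W first ∧ ∀ n ∈ rest, w ∈ W n) := by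
  rw [PySem.Set.mem_ofList, List.mem_filter]
  simp only [Bool.and_eq_true, List.all_eq_true, List.contains_iff_mem]
  tauto

-- under Pre_ both maxima are the unique longest distinct meaningful common word
lemma pvPickEq (W : String → List String) (p : String → Bool) (first : String) (rest : List String)
    (hpre : ((PySem.Set.ofList ((W first).filter
        (fun w => p w && rest.all (fun n => (W n).contains w)))).filter
      (fun w => decide (∀ v ∈ PySem.Set.ofList ((W first).filter
        (fun w => p w && rest.all (fun n => (W n).contains w))), PySem.Str.len v ≤ PySem.Str.len w))).length ≤ 1)
    {ma mb : String}
    (hma : PySem.List.max? (((rest.map (fun n => PySem.Set.ofList (W n))).foldl PySem.Set.inter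
            (PySem.Set.ofList (W first))).filter p) (fun w => PySem.Str.len w) = some ma)
    (hmb : PySem.List.max? ((W first).filter
        (fun w => p w && (rest.map (fun n => PySem.Set.ofList (W n))).all
          (fun ws => PySem.Set.contains ws w))) (fun w => PySem.Str.len w) = some mb) :
    ma = mb := by
  have hmemA := (pvMemMeaningful W p first rest ma).mp (PySem.List.max?_mem hma)
  have hmemB := (pvMemCandidates W p first rest mb).mp (PySem.List.max?_mem hmb)
  have hmaxA := PySem.List.max?_isMax hma
  have hmaxB := PySem.List.max?_isMax hmb
  have hA : ∀ v ∈ PySem.Set.ofList ((W first).filter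
      (fun w => p w && rest.all (fun n => (W n).contains w))), PySem.Str.len v ≤ PySem.Str.len ma := by
    intro v hv
    exact hmaxA v ((pvMemMeaningful W p first rest v).mpr ((pvMemDistinct W p first rest v).mp hv))
  have hB : ∀ v ∈ PySem.Set.ofList ((W first).filter
      (fun w => p w && rest.all (fun n => (W n).contains w))), PySem.Str.len v ≤ PySem.Str.len mb := by
    intro v hv
    exact hmaxB v ((pvMemCandidates W p first rest v).mpr ((pvMemDistinct W p first rest v).mp hv))
  have hxa : ma ∈ (PySem.Set.ofList ((W first).filter
      (fun w => p w && rest.all (fun n => (W n).contains w)))).filter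
      (fun w => decide (∀ v ∈ PySem.Set.ofList ((W first).filter
        (fun w => p w && rest.all (fun n => (W n).contains w))), PySem.Str.len v ≤ PySem.Str.len w)) := by
    rw [List.mem_filter]
    exact ⟨(pvMemDistinct W p first rest ma).mpr hmemA, by simpa using hA⟩
  have hxb : mb ∈ (PySem.Set.ofList ((W first).filter
      (fun w => p w && rest.all (fun n => (W n).contains w)))).filter
      (fun w => decide (∀ v ∈ PySem.Set.ofList ((W first).filter
        (fun w => p w && rest.all (fun n => (W n).contains w))), PySem.Str.len v ≤ PySem.Str.len w)) := by
    rw [List.mem_filter]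
    exact ⟨(pvMemDistinct W p first rest mb).mpr hmemB, by simpa using hB⟩
  exact pvLenLeOne hpre hxa hxb

-- ---- longest-common-prefix lemmas ----
lemma pvNotConsLeNil (x : Char) (u : List Char) : ¬ ((x :: u : List Char) ≤ ([] : List Char)) := by
  intro h
  rcases lt_or_eq_of_le h with h | h
  · cases h
  · simp at h

-- a ≤ on List Char (the lexicographic linear order) at a cons
lemma pvConsLe (x y : Char) (u v : List Char) :
    ((x :: u : List Char) ≤ (y :: v : List Char)) ↔ x < y ∨ (x = y ∧ u ≤ v) := by
  rw [le_iff_lt_or_eq, le_iff_lt_or_eq, List.cons_lt_cons_iff, List.cons_eq_cons]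
  tauto

lemma pvLcp2_greatest : ∀ (q a b : List Char), q <+: a → q <+: b → q <+: pvLcp2 a b := by
  intro q
  induction q with
  | nil => intro a b _ _; exact List.nil_prefix
  | cons c q' ih =>
    intro a b ha hb
    obtain ⟨a', rfl, ha'⟩ : ∃ a', a = c :: a' ∧ q' <+: a' := by
      cases a with
      | nil => exact absurd ha (by simp)
      | cons x a' =>
        obtain ⟨h1, h2⟩ := List.cons_prefix_cons.mp ha
        exact ⟨a', by rw [h1], h2⟩
    obtain ⟨b', rfl, hb'⟩ : ∃ b', b = c :: b' ∧ q' <+: b' := by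
      cases b with
      | nil => exact absurd hb (by simp)
      | cons y b' =>
        obtain ⟨h1, h2⟩ := List.cons_prefix_cons.mp hb
        exact ⟨b', by rw [h1], h2⟩
    show c :: q' <+: pvLcp2 (c :: a') (c :: b')
    simp only [pvLcp2]
    exact List.cons_prefix_cons.mpr ⟨rfl, ih a' b' ha' hb'⟩

-- the sorted-min/sorted-max trick: for a ≤ b ≤ c, lcp(a, c) is a prefix of b
lemma pvLcp2_between : ∀ (a c b : List Char), a ≤ b → b ≤ c → pvLcp2 a c <+: b := by
  intro a
  induction a with
  | nil => intro c b _ _; simp [pvLcp2]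
  | cons x a' ih =>
    intro c b hab hbc
    cases c with
    | nil => simp [pvLcp2]
    | cons z c' =>
      by_cases hxz : x = z
      · subst hxz
        cases b with
        | nil => exact absurd hab (pvNotConsLeNil _ _)
        | cons y b' =>
          rcases pvConsLe _ _ _ _ |>.mp hab with h | ⟨hxy, hab'⟩
          · rcases pvConsLe _ _ _ _ |>.mp hbc with h2 | ⟨hyx, hbc'⟩
            · exact absurd (lt_trans h h2) (lt_irrefl x)
            · subst hyx; exact absurd h (lt_irrefl y)
          · subst hxy
            rcases pvConsLe _ _ _ _ |>.mp hbc with h2 | ⟨_, hbc'⟩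
            · exact absurd h2 (lt_irrefl x)
            · show pvLcp2 (x :: a') (x :: c') <+: x :: b'
              simp only [pvLcp2]
              exact List.cons_prefix_cons.mpr ⟨rfl, ih c' b' hab' hbc'⟩
      · simp [pvLcp2, hxz]

lemma pvColScan_prefix_first : ∀ (f : List Char) (os : List (List Char)), pvColScan f os <+: f := by
  intro f
  induction f with
  | nil => intro os; simp [pvColScan]
  | cons c t ih =>
    intro os
    by_cases h : os.all (fun o => o.head? == some c)
    · show pvColScan (c :: t) os <+: c :: t
      simp only [pvColScan, if_pos h]
      exact List.cons_prefix_cons.mpr ⟨rfl, ih _⟩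
    · simp [pvColScan, h]

lemma pvColScan_prefix_mem : ∀ (f : List Char) (os : List (List Char)),
    ∀ o ∈ os, pvColScan f os <+: o := by
  intro f
  induction f with
  | nil => intro os o _; simp [pvColScan]
  | cons c t ih =>
    intro os o ho
    by_cases h : os.all (fun o => o.head? == some c)
    · have hh : o.head? = some c := by
        have := List.all_eq_true.mp h o ho
        simpa using this
      cases o with
      | nil => simp at hh
      | cons d o' =>
        have hd : d = c := by simpa using hh
        subst hd
        have : pvColScan t (os.map List.tail) <+: o' := by
          have : (d :: o').tail ∈ os.map List.tail := List.mem_map_of_mem ho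
          simpa using ih (os.map List.tail) o' this
        show pvColScan (d :: t) os <+: d :: o'
        simp only [pvColScan, if_pos h]
        exact List.cons_prefix_cons.mpr ⟨rfl, this⟩
    · simp [pvColScan, h]

lemma pvColScan_greatest : ∀ (q f : List Char) (os : List (List Char)),
    q <+: f → (∀ o ∈ os, q <+: o) → q <+: pvColScan f os := by
  intro q
  induction q with
  | nil => intro f os _ _; exact List.nil_prefix
  | cons c q' ih =>
    intro f os hf hos
    obtain ⟨f', rfl, hf'⟩ : ∃ f', f = c :: f' ∧ q' <+: f' := by
      cases f with
      | nil => exact absurd hf (by simp)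
      | cons x f' =>
        obtain ⟨h1, h2⟩ := List.cons_prefix_cons.mp hf
        exact ⟨f', by rw [h1], h2⟩
    have hcond : os.all (fun o => o.head? == some c) = true := by
      rw [List.all_eq_true]
      intro o ho
      obtain ⟨x, o', rfl⟩ : ∃ x o', o = x :: o' := by
        cases o with
        | nil => exact absurd (hos _ ho) (by simp)
        | cons x o' => exact ⟨x, o', rfl⟩
      obtain ⟨h1, _⟩ := List.cons_prefix_cons.mp (hos _ ho)
      simp [h1]
    have htail : ∀ o' ∈ os.map List.tail, q' <+: o' := by
      rintro o' ho'
      obtain ⟨o, ho, rfl⟩ := List.mem_map.mp ho'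
      cases o with
      | nil => exact absurd (hos _ ho) (by simp)
      | cons x o'' =>
        obtain ⟨_, h2⟩ := List.cons_prefix_cons.mp (hos _ ho)
        simpa using h2
    show c :: q' <+: pvColScan (c :: f') os
    simp only [pvColScan, if_pos hcond]
    exact List.cons_prefix_cons.mpr ⟨rfl, ih f' (os.map List.tail) hf' htail⟩

-- the two prefix computations agree on any list of two or more names
lemma pvPrefixEq (a b : String) (t : List String) :
    pvLcp2 (PySem.List.pyGetD (PySem.List.sorted (a :: b :: t) (fun x => x) false) 0 "").toList
           (PySem.List.pyGetD (PySem.List.sorted (a :: b :: t) (fun x => x) false) (-1) "").toList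
      = pvColScan a.toList ((b :: t).map String.toList) := by
  have hlen : (PySem.List.sorted (a :: b :: t) (fun x => x) false).length = t.length + 2 := by
    simp [PySem.List.length_sorted]
  have hne : PySem.List.sorted (a :: b :: t) (fun x => x) false ≠ [] := by
    intro h; rw [h] at hlen; simp at hlen
  have h0 : 0 < (PySem.List.sorted (a :: b :: t) (fun x => x) false).length := by omega
  have hs0 : PySem.List.pyGetD (PySem.List.sorted (a :: b :: t) (fun x => x) false) 0 ""
      = (PySem.List.sorted (a :: b :: t) (fun x => x) false)[0]'h0 := by
    rw [PySem.List.pyGetD_eq_getElem _ "" le_rfl (by exact_mod_cast h0)]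
    norm_num
  have hsl : PySem.List.pyGetD (PySem.List.sorted (a :: b :: t) (fun x => x) false) (-1) ""
      = (PySem.List.sorted (a :: b :: t) (fun x => x) false).getLast hne :=
    PySem.List.pyGetD_neg_one _ "" hne
  have hlast : (PySem.List.sorted (a :: b :: t) (fun x => x) false).getLast hne
      = (PySem.List.sorted (a :: b :: t) (fun x => x) false)[
          (PySem.List.sorted (a :: b :: t) (fun x => x) false).length - 1]'(by omega) :=
    List.getLast_eq_getElem hne
  have hbound : ∀ x ∈ (a :: b :: t),
      (PySem.List.sorted (a :: b :: t) (fun x => x) false)[0]'h0 ≤ x ∧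
      x ≤ (PySem.List.sorted (a :: b :: t) (fun x => x) false).getLast hne := by
    intro x hx
    have hxS : x ∈ PySem.List.sorted (a :: b :: t) (fun x => x) false :=
      (PySem.List.mem_sorted _ _ _ _).mpr hx
    obtain ⟨i, hi, rfl⟩ := List.mem_iff_getElem.mp hxS
    refine ⟨PySem.List.key_sorted_getElem_mono (a :: b :: t) (fun x => x) (Nat.zero_le i) hi, ?_⟩
    rw [hlast]
    exact PySem.List.key_sorted_getElem_mono (a :: b :: t) (fun x => x) (by omega) (by omega)
  have hs0mem : (PySem.List.sorted (a :: b :: t) (fun x => x) false)[0]'h0 ∈ (a :: b :: t) :=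
    (PySem.List.mem_sorted _ _ _ _).mp (List.getElem_mem _)
  have hslmem : (PySem.List.sorted (a :: b :: t) (fun x => x) false).getLast hne ∈ (a :: b :: t) :=
    (PySem.List.mem_sorted _ _ _ _).mp (List.getLast_mem hne)
  rw [hs0, hsl]
  have hp1 : ∀ x ∈ (a :: b :: t),
      pvLcp2 ((PySem.List.sorted (a :: b :: t) (fun x => x) false)[0]'h0).toList
             ((PySem.List.sorted (a :: b :: t) (fun x => x) false).getLast hne).toList <+: x.toList := by
    intro x hx
    obtain ⟨h1, h2⟩ := hbound x hx
    exact pvLcp2_between _ _ _ (String.le_iff_toList_le.mp h1) (String.le_iff_toList_le.mp h2)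
  have hp2 : ∀ x ∈ (a :: b :: t),
      pvColScan a.toList ((b :: t).map String.toList) <+: x.toList := by
    intro x hx
    rcases List.mem_cons.mp hx with rfl | hx'
    · exact pvColScan_prefix_first _ _
    · exact pvColScan_prefix_mem _ _ _ (List.mem_map_of_mem hx')
  have h12 : pvLcp2 ((PySem.List.sorted (a :: b :: t) (fun x => x) false)[0]'h0).toList
      ((PySem.List.sorted (a :: b :: t) (fun x => x) false).getLast hne).toList
      <+: pvColScan a.toList ((b :: t).map String.toList) := by
    refine pvColScan_greatest _ _ _ (hp1 a (by simp)) ?_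
    rintro o ho
    obtain ⟨x, hx, rfl⟩ := List.mem_map.mp ho
    exact hp1 x (List.mem_cons_of_mem _ hx)
  have h21 : pvColScan a.toList ((b :: t).map String.toList)
      <+: pvLcp2 ((PySem.List.sorted (a :: b :: t) (fun x => x) false)[0]'h0).toList
          ((PySem.List.sorted (a :: b :: t) (fun x => x) false).getLast hne).toList :=
    pvLcp2_greatest _ _ _ (hp2 _ hs0mem) (hp2 _ hslmem)
  exact h12.eq_of_length (Nat.le_antisymm h12.length_le h21.length_le)

set_option maxHeartbeats 1600000 in
set_option maxHeartbeats 1600000 in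
theorem create_family_name_py_spec : Claim_equal_create_family_name_py := by
  intro fn fid ml _ hpre
  unfold Spec_create_family_name_py
  rcases fn with _ | ⟨a, _ | ⟨b, t⟩⟩
  · rfl
  · rfl
  · unfold Pre_create_family_name_py at hpre
    simp only [pvDistinctMeaningful] at hpre
    unfold create_family_name_py create_family_name_py_alt
    rw [if_neg (by simp : ¬((a :: b :: t : List String) = []))]
    rw [if_neg (by simp : ¬((a :: b :: t : List String).length = 1))]
    simp only [List.map_cons]
    rw [if_pos (by simp : 1 < (PySem.Set.ofList (pvWords a) :: PySem.Set.ofList (pvWords b) ::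
      List.map (fun n => PySem.Set.ofList (pvWords n)) t).length)]
    rw [if_pos (by simp : 1 < (a :: b :: t : List String).length)]
    by_cases hc : ((pvWords a).filter
        (fun w => pvMeaningfulPred w && ((b :: t).map (fun n => PySem.Set.ofList (pvWords n))).all
          (fun ws => PySem.Set.contains ws w))) = []
    · -- no meaningful common word on either side: both fall to the prefix paragraph
      have hm : (((b :: t).map (fun n => PySem.Set.ofList (pvWords n))).foldl
          PySem.Set.inter (PySem.Set.ofList (pvWords a))).filter pvMeaningfulPred = [] := by
        rw [List.eq_nil_iff_forall_not_mem]
        intro w hw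
        have hmm := (pvMemMeaningful pvWords pvMeaningfulPred a (b :: t) w).mp hw
        have hw' := (pvMemCandidates pvWords pvMeaningfulPred a (b :: t) w).mpr hmm
        rw [hc] at hw'
        cases hw'
      have hc' := hc
      have hm' := hm
      have hpe := pvPrefixEq a b t
      simp only [List.map_cons] at hc' hm' hpe
      rw [if_neg (not_not_intro hc')]
      rw [hpe]
      by_cases hcom : List.foldl PySem.Set.inter (PySem.Set.ofList (pvWords a))
          (PySem.Set.ofList (pvWords b) :: List.map (fun n => PySem.Set.ofList (pvWords n)) t) = []
      · rw [if_neg (not_not_intro hcom)]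
        exact Option.getD_none
      · rw [if_pos hcom, if_neg (not_not_intro hm')]
        exact Option.getD_none
    · -- a meaningful common word exists: both take the common-word branch
      obtain ⟨mb, hmb⟩ : ∃ mb, PySem.List.max? ((pvWords a).filter
          (fun w => pvMeaningfulPred w && ((b :: t).map (fun n => PySem.Set.ofList (pvWords n))).all
            (fun ws => PySem.Set.contains ws w))) (fun w => PySem.Str.len w) = some mb := by
        rcases h : PySem.List.max? _ (fun w => PySem.Str.len w) with _ | mb
        · exact absurd ((PySem.List.max?_eq_none_iff _ _).mp h) hc
        · exact ⟨mb, rfl⟩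
      have hmem0 := (pvMemCandidates pvWords pvMeaningfulPred a (b :: t) mb).mp
        (PySem.List.max?_mem hmb)
      have hmne : (((b :: t).map (fun n => PySem.Set.ofList (pvWords n))).foldl
          PySem.Set.inter (PySem.Set.ofList (pvWords a))).filter pvMeaningfulPred ≠ [] := by
        intro h
        have hmm := (pvMemMeaningful pvWords pvMeaningfulPred a (b :: t) mb).mpr hmem0
        rw [h] at hmm
        cases hmm
      have hcom : (((b :: t).map (fun n => PySem.Set.ofList (pvWords n))).foldl
          PySem.Set.inter (PySem.Set.ofList (pvWords a))) ≠ [] := by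
        intro h
        apply hmne
        rw [h]
        rfl
      obtain ⟨ma, hma⟩ : ∃ ma, PySem.List.max? ((((b :: t).map (fun n => PySem.Set.ofList (pvWords n))).foldl
          PySem.Set.inter (PySem.Set.ofList (pvWords a))).filter pvMeaningfulPred)
          (fun w => PySem.Str.len w) = some ma := by
        rcases h : PySem.List.max? _ (fun w => PySem.Str.len w) with _ | ma
        · exact absurd ((PySem.List.max?_eq_none_iff _ _).mp h) hmne
        · exact ⟨ma, rfl⟩
      have heq := pvPickEq pvWords pvMeaningfulPred a (b :: t) hpre hma hmb
      have hc' := hc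
      have hcom' := hcom
      have hmne' := hmne
      have hma' := hma
      have hmb' := hmb
      simp only [List.map_cons] at hc' hcom' hmne' hma' hmb'
      rw [if_pos hcom', if_pos hmne', if_pos hc']
      rw [hma', hmb', heq]
      exact Option.getD_some
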